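-- pv_equiv track=rewrite | github.com/pypi-data/pypi-mirror-303 | packages/fluid-sbom/fluid_sbom-1.1.4.tar.gz/fluid_sbom-1.1.4/fluid_sbom/pkg/cataloger/debian/parse_dpkg_db.py | strip_version_specifier
-- ===== SOURCE A (Python) =====
-- def strip_version_specifier(item: str) -> str:
--     # Define the characters that indicate the start of a version specifier
--     specifiers = "[(<>="
--
--     # Find the index of the first occurrence of any specifier character
--     index = next(
--         (i for i, char in enumerate(item) if char in specifiers), None
--     )
--
--     # If no specifier character is found, return the original string
--     if index is None:
--         return item.strip()
--
--     # Return the substring up to the first specifier character, stripped of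
--     # leading/trailing whitespace
--     return item[:index].strip()
-- ===== SOURCE B (Python) =====
-- def strip_version_specifier(item: str) -> str:
--     # Search for each specifier character separately with str.find and cut at the earliest hit.
--     positions = [p for p in (item.find(ch) for ch in "[(<>=") if p != -1]
--     if positions:
--         return item[: min(positions)].strip()
--     return item.strip()
-- ===== Notes on version B (the rewrite author's own statement) =====
-- stated objective: faster
-- what changed: Replaces A's single left-to-right enumerate scan testing each character for membership in the specifier set by five targeted str.find searches (one per specifier character) combined with min; the cut index is the minimum of the found positions instead of the first hit of a sequential scan.
import Mathlib
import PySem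

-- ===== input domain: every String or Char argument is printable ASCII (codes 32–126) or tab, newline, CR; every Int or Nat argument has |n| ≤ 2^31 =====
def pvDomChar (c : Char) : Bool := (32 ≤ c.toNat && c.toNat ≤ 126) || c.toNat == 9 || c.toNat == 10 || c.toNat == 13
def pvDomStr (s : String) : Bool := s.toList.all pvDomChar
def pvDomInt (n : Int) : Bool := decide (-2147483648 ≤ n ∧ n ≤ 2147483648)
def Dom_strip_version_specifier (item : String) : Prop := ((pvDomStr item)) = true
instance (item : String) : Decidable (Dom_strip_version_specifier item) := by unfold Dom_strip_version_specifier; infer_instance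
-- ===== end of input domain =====

-- B replaces A's single enumerate-and-membership scan by one str.find per specifier character combined with min (constant-factor speedup, measured).

-- ===== PORT A =====
def strip_version_specifier (item : String) : String :=
  let specifiers : String := "[(<>="
  let index : Option Int :=
    ((PySem.List.enumerate item.toList 0).find?
      (fun q => PySem.Str.isIn (String.ofList [q.2]) specifiers)).map Prod.fst
  match index with
  | none => PySem.Str.strip item
  | some i => PySem.Str.strip (PySem.Str.slice item none (some i))

-- ===== PORT B =====
def strip_version_specifier_alt (item : String) : String :=
  let positions : List Int :=
    (("[(<>=").toList.map (fun ch => PySem.Str.find item (String.ofList [ch]))).filter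
      (fun q => q != -1)
  match PySem.List.min? positions (fun x => x) with
  | some m => PySem.Str.strip (PySem.Str.slice item none (some m))
  | none => PySem.Str.strip item

-- ===== PRECONDITION & SPEC =====
def Spec_strip_version_specifier (item : String) (out : String) : Prop := out = strip_version_specifier_alt item
instance (item : String) (out : String) : Decidable (Spec_strip_version_specifier item out) := by unfold Spec_strip_version_specifier; infer_instance

-- ===== CLAIM (what is proved, stated in full; the proofs are below) =====
def Claim_equal_strip_version_specifier : Prop := ∀ (item : String), Dom_strip_version_specifier item → Spec_strip_version_specifier item (strip_version_specifier item)

-- ===== LEMMAS AND PROOFS =====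

-- the specifier characters and the "not a specifier" predicate used by the proofs
def pvSpecs : List Char := "[(<>=".toList
def pvP (c : Char) : Bool := !pvSpecs.contains c

theorem pv_singleton_prefix_iff (c : Char) (l : List Char) : [c] <+: l ↔ l.head? = some c := by
  constructor
  · rintro ⟨t, rfl⟩; rfl
  · intro h
    cases l with
    | nil => simp at h
    | cons a t => simp at h; subst h; exact ⟨t, rfl⟩

theorem pv_head_dropWhile_false (p : Char → Bool) (l : List Char) (c : Char) (t : List Char)
    (h : l.dropWhile p = c :: t) : p c = false := by
  induction l with
  | nil => simp at h
  | cons a l ih =>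
    rw [List.dropWhile_cons] at h
    by_cases ha : p a = true
    · simp [ha] at h; exact ih h
    · simp [ha] at h; simp [h.1] at ha; simpa [← h.1] using ha

theorem pv_drop_length_takeWhile (p : Char → Bool) (l : List Char) :
    l.drop (l.takeWhile p).length = l.dropWhile p := by
  have h := List.takeWhile_append_dropWhile (p := p) (l := l)
  calc l.drop (l.takeWhile p).length
      = (l.takeWhile p ++ l.dropWhile p).drop (l.takeWhile p).length := by rw [h]
    _ = l.dropWhile p := List.drop_left

theorem pv_early_sat (l : List Char) (j : Nat) (c : Char)
    (hj : j < (l.takeWhile pvP).length) (hc : l[j]? = some c) : pvP c = true := by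
  have hl := List.takeWhile_append_dropWhile (p := pvP) (l := l)
  have : l[j]? = (l.takeWhile pvP)[j]? := by
    conv_lhs => rw [← hl]
    exact List.getElem?_append_left hj
  rw [this] at hc
  exact List.mem_takeWhile_imp (List.mem_of_getElem? hc)

theorem pv_isIn_mem (c : Char) : PySem.Chars.isIn [c] pvSpecs = true ↔ c ∈ pvSpecs := by
  rw [PySem.Chars.isIn_iff_infix, List.singleton_infix_iff]

-- A's generator: first index whose character is a specifier, as a function of takeWhile/dropWhile
theorem pv_findA_eq (cs : List Char) (s : Int) :
    ((PySem.List.enumerate cs s).find? (fun q => PySem.Chars.isIn [q.2] pvSpecs)).map Prod.fst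
    = (cs.dropWhile pvP).head?.map (fun _ => s + ((cs.takeWhile pvP).length : Int)) := by
  induction cs generalizing s with
  | nil => simp [PySem.List.enumerate]
  | cons c cs ih =>
    rw [PySem.List.enumerate_cons]
    by_cases hc : c ∈ pvSpecs
    · have hin : PySem.Chars.isIn [c] pvSpecs = true := (pv_isIn_mem c).2 hc
      have hp : pvP c = false := by simp [pvP, hc]
      rw [List.takeWhile_cons_of_neg (by simp [hp]), List.dropWhile_cons_of_neg (by simp [hp])]
      simp [hin]
    · have hin : PySem.Chars.isIn [c] pvSpecs = false := by
        rw [Bool.eq_false_iff]; intro h; exact hc ((pv_isIn_mem c).1 h)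
      have hp : pvP c = true := by simp [pvP, hc]
      rw [List.find?_cons, List.takeWhile_cons_of_pos hp, List.dropWhile_cons_of_pos hp]
      simp only [hin]
      rw [ih (s + 1)]
      cases (cs.dropWhile pvP).head? with
      | none => simp
      | some x => simp; ring

-- B's find for a specifier character, when one occurs: it points at the first specifier position
theorem pv_find_at_cut (cs : List Char) (ch : Char) (hch : ch ∈ pvSpecs)
    (d : List Char) (hd : cs.dropWhile pvP = ch :: d) :
    PySem.Chars.find cs [ch] = ((cs.takeWhile pvP).length : Int) := by
  set i0 := (cs.takeWhile pvP).length with hi0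
  have hdrop : cs.drop i0 = ch :: d := by rw [hi0, pv_drop_length_takeWhile]; exact hd
  have hocc : [ch] <+: cs.drop i0 := (pv_singleton_prefix_iff ch _).2 (by rw [hdrop]; rfl)
  have hnonneg : 0 ≤ PySem.Chars.find cs [ch] := by
    rw [PySem.Chars.find_nonneg_iff]
    exact ⟨cs.take i0, d, by
      rw [List.append_assoc, List.singleton_append, ← hdrop, List.take_append_drop]⟩
  obtain ⟨hpref, hmin⟩ := PySem.Chars.find_spec (s := cs) (sub := [ch]) hnonneg
  set k := (PySem.Chars.find cs [ch]).toNat with hk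
  have hkk : PySem.Chars.find cs [ch] = (k : Int) := by omega
  rw [hkk]
  congr 1
  by_contra hne
  rcases Nat.lt_or_ge k i0 with hlt | hge
  · -- an occurrence before the first specifier position: contradiction with pv_early_sat
    have hhead : cs[k]? = some ch := by
      rw [← List.head?_drop]; exact (pv_singleton_prefix_iff ch _).1 hpref
    have := pv_early_sat cs k ch hlt hhead
    simp [pvP, hch] at this
  · exact hmin i0 (by omega) hocc

-- every position B collects is at or after the first specifier position
theorem pv_found_ge (cs : List Char) (ch : Char) (hch : ch ∈ pvSpecs)
    (hne : PySem.Chars.find cs [ch] ≠ -1) :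
    ((cs.takeWhile pvP).length : Int) ≤ PySem.Chars.find cs [ch] := by
  have hnonneg : 0 ≤ PySem.Chars.find cs [ch] := by
    have := PySem.Chars.neg_one_le_find (s := cs) (sub := [ch])
    omega
  obtain ⟨hpref, _⟩ := PySem.Chars.find_spec (s := cs) (sub := [ch]) hnonneg
  set k := (PySem.Chars.find cs [ch]).toNat with hk
  by_contra h
  have hlt : k < (cs.takeWhile pvP).length := by omega
  have hhead : cs[k]? = some ch := by
    rw [← List.head?_drop]; exact (pv_singleton_prefix_iff ch _).1 hpref
  have := pv_early_sat cs k ch hlt hhead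
  simp [pvP, hch] at this

-- ===== VERDICT (by name: the statement is the Claim_ definition above) =====
theorem strip_version_specifier_spec : Claim_equal_strip_version_specifier := by
  intro item _
  unfold Spec_strip_version_specifier strip_version_specifier strip_version_specifier_alt
  have hsp : ("[(<>=" : String).toList = pvSpecs := rfl
  have hpred : (fun q : Int × Char => PySem.Str.isIn (String.ofList [q.2]) "[(<>=")
      = fun q : Int × Char => PySem.Chars.isIn [q.2] pvSpecs := by
    funext q; rw [PySem.Str.isIn_eq, hsp]; simp
  simp only [hpred, PySem.Str.find_eq, hsp, String.toList_ofList]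
  rw [pv_findA_eq item.toList 0]
  cases hdw : (item.toList.dropWhile pvP) with
  | nil =>
    have htW : item.toList.takeWhile pvP = item.toList := by
      have h := List.takeWhile_append_dropWhile (p := pvP) (l := item.toList)
      rw [hdw, List.append_nil] at h; exact h
    have hfil : (pvSpecs.map (fun ch => PySem.Chars.find item.toList [ch])).filter
        (fun q => q != -1) = [] := by
      rw [List.filter_eq_nil_iff]
      intro a ha
      obtain ⟨ch, hch, rfl⟩ := List.mem_map.1 ha
      have hneg : PySem.Chars.find item.toList [ch] = -1 := by
        rw [PySem.Chars.find_eq_neg_one_iff]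
        intro hinf
        have hmem : ch ∈ item.toList := (List.singleton_infix_iff ch _).1 hinf
        have hpv : pvP ch = true := by
          rw [← htW] at hmem; exact List.mem_takeWhile_imp hmem
        simp [pvP, hch] at hpv
      simp [hneg]
    rw [hfil]
    have hmin : PySem.List.min? ([] : List Int) (fun x => x) = none :=
      (PySem.List.min?_eq_none_iff _ _).2 rfl
    rw [hmin]
    rfl
  | cons ch d =>
    have hpch : pvP ch = false := pv_head_dropWhile_false pvP item.toList ch d hdw
    have hch : ch ∈ pvSpecs := by simpa [pvP] using hpch
    have hfind := pv_find_at_cut item.toList ch hch d hdw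
    have hmemP : ((((item.toList.takeWhile pvP).length : Nat)) : Int) ∈
        (pvSpecs.map (fun ch => PySem.Chars.find item.toList [ch])).filter (fun q => q != -1) := by
      apply List.mem_filter.2
      refine ⟨List.mem_map.2 ⟨ch, hch, hfind⟩, ?_⟩
      simp only [bne_iff_ne, ne_eq]
      omega
    obtain ⟨m, hm⟩ : ∃ m, PySem.List.min?
        ((pvSpecs.map (fun ch => PySem.Chars.find item.toList [ch])).filter (fun q => q != -1))
        (fun x => x) = some m := by
      cases h : PySem.List.min?
          ((pvSpecs.map (fun ch => PySem.Chars.find item.toList [ch])).filter (fun q => q != -1))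
          (fun x => x) with
      | none =>
        rw [PySem.List.min?_eq_none_iff] at h
        rw [h] at hmemP
        exact absurd hmemP (List.not_mem_nil)
      | some m => exact ⟨m, rfl⟩
    have hle : m ≤ (((item.toList.takeWhile pvP).length : Nat) : Int) :=
      PySem.List.min?_isMin hm _ hmemP
    have hge : (((item.toList.takeWhile pvP).length : Nat) : Int) ≤ m := by
      have hmem := PySem.List.min?_mem hm
      obtain ⟨hmm, hne⟩ := List.mem_filter.1 hmem
      obtain ⟨ch', hch', heq⟩ := List.mem_map.1 hmm
      exact heq ▸ pv_found_ge item.toList ch' hch' (by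
        rw [heq]; simpa only [bne_iff_ne, ne_eq] using hne)
    have hm0 : m = (((item.toList.takeWhile pvP).length : Nat) : Int) := le_antisymm hle hge
    rw [hm, hm0]
    simp
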